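-- pv_equiv track=rewrite | github.com/mghazwi/IDASH-2021 | benchmark/src/utils.py | possibleKeys
-- ===== SOURCE A (Python) =====
-- def possibleKeys(key):
--     result = []
--     size = len(key)
--     for i in range(2**size):
--         tmp = []
--         for j in range(size):
--             if i & (1 << j) == (1 << j):
--                 tmp.append(str(key[j]))
--             else:
--                 tmp.append("*")
--         result.append(tmp)
--     return result[1:]
-- ===== SOURCE B (Python) =====
-- def possibleKeys(key):
--     rows = [[]]
--     for x in reversed(key):
--         rows = [[c] + r for r in rows for c in ["*", str(x)]]
--     return rows[1:]
-- ===== Notes on version B (the rewrite author's own statement) =====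
-- stated objective: idiomatic
-- what changed: Replaces the range(2**n) loop with per-index bit-mask tests by a cartesian-product fold that builds each row from per-position choices ['*', str(x)], then drops the first all-'*' row.
import Mathlib
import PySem

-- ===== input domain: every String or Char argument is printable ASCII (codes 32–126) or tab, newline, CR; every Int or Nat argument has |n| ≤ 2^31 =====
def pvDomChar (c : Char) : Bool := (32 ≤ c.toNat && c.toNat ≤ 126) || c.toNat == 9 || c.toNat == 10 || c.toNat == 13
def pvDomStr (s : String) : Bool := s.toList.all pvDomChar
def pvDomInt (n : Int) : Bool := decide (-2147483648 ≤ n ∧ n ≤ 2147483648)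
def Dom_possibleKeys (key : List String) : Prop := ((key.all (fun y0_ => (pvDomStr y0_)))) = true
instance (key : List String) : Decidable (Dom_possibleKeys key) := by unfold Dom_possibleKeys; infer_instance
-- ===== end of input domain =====

-- B replaces A's bit-mask arithmetic over range(2**n) by building the mask rows with a
-- cartesian-product fold over the key (objective: simpler/idiomatic; no speed claim).

-- ===== PORT A =====
-- i and j are nonnegative (they come from range), so `1 << j` is ported as `(1:Int) <<< j`
-- and `2**size` as `(2:Int) ^ key.length` (size = len(key) ≥ 0); key[j] with 0 ≤ j < len(key)
-- is in range, so pyGetD is exact; str(key[j]) is the identity on a str.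
def possibleKeys (key : List String) : List (List String) :=
  let size : Int := PySem.List.len key
  let result :=
    (PySem.List.pyRange 0 ((2:Int) ^ key.length) 1).foldl (fun result i =>
      let tmp :=
        (PySem.List.pyRange 0 size 1).foldl (fun tmp j =>
          if PySem.Int.band i ((1:Int) <<< j) = (1:Int) <<< j then
            tmp ++ [PySem.List.pyGetD key j ""]
          else
            tmp ++ ["*"]) []
      result ++ [tmp]) []
  PySem.List.slice result (some 1) none

-- ===== PORT B =====
def possibleKeys_alt (key : List String) : List (List String) :=
  let rows :=
    key.reverse.foldl (fun rows x => rows.flatMap (fun r => ["*" :: r, x :: r])) [[]]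
  PySem.List.slice rows (some 1) none

-- ===== PRECONDITION & SPEC =====
def Spec_possibleKeys (key : List String) (out : List (List String)) : Prop := out = possibleKeys_alt key
instance (key : List String) (out : List (List String)) : Decidable (Spec_possibleKeys key out) := by unfold Spec_possibleKeys; infer_instance

-- ===== CLAIM (what is proved, stated in full; the proofs are below) =====
def Claim_equal_possibleKeys : Prop := ∀ (key : List String), Dom_possibleKeys key → Spec_possibleKeys key (possibleKeys key)

-- ===== LEMMAS AND PROOFS =====

-- A's row for index i, as a map over positions (testBit form of A's mask condition).
def aRow (key : List String) (i : Nat) : List String :=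
  (List.range key.length).map (fun j => if i.testBit j then key.getD j "" else "*")

-- B's full table (before dropping the first, all-'*' row).
def bCore (key : List String) : List (List String) :=
  key.foldr (fun x rows => rows.flatMap (fun r => ["*" :: r, x :: r])) [[]]

theorem band_shift_eq_testBit (m j : Nat) :
    (PySem.Int.band (m : Int) ((1:Int) <<< (j : Int)) = (1:Int) <<< (j : Int)) ↔ m.testBit j := by
  have h1 : (1:Int) <<< (j : Int) = ((1 <<< j : Nat) : Int) := by
    exact_mod_cast Int.shiftLeft_natCast 1 j
  rw [h1, PySem.Int.band_natCast, Nat.cast_inj, Nat.shiftLeft_eq, one_mul, Nat.and_two_pow]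
  constructor
  · intro h2
    by_cases hb : m.testBit j
    · exact hb
    · exfalso
      rw [Bool.not_eq_true] at hb
      rw [hb] at h2
      have hp : 0 < 2 ^ j := Nat.two_pow_pos j
      simp at h2
      omega
  · intro hb
    rw [hb]
    simp

-- A's inner loop computes aRow.
theorem inner_eq_aRow (key : List String) (m : Nat) :
    (PySem.List.pyRange 0 (PySem.List.len key) 1).foldl (fun tmp j =>
        if PySem.Int.band (m : Int) ((1:Int) <<< j) = (1:Int) <<< j then
          tmp ++ [PySem.List.pyGetD key j ""]
        else
          tmp ++ ["*"]) []
      = aRow key m := by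
  have hbody : ∀ (tmp : List String) (j : Int),
      (if PySem.Int.band (m : Int) ((1:Int) <<< j) = (1:Int) <<< j then
          tmp ++ [PySem.List.pyGetD key j ""]
        else
          tmp ++ ["*"])
        = tmp ++ [if PySem.Int.band (m : Int) ((1:Int) <<< j) = (1:Int) <<< j then
            PySem.List.pyGetD key j "" else "*"] := by
    intro tmp j
    exact (apply_ite (fun s => tmp ++ [s]) _ _ _).symm
  rw [PySem.List.len_eq, PySem.List.pyRange_zero_natCast]
  simp only [hbody]
  rw [PySem.List.foldl_append_singleton_eq_map, List.map_map]
  unfold aRow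
  apply List.map_congr_left
  intro j hj
  simp only [Function.comp]
  by_cases h : m.testBit j
  · rw [if_pos ((band_shift_eq_testBit m j).mpr h), if_pos h, PySem.List.pyGetD_natCast]
  · rw [if_neg (fun hc => h ((band_shift_eq_testBit m j).mp hc)), if_neg h]

theorem range_two_mul_map {α : Type} (f : Nat → α) (m : Nat) :
    (List.range (2 * m)).map f = (List.range m).flatMap (fun i => [f (2 * i), f (2 * i + 1)]) := by
  induction m with
  | zero => simp
  | succ m ih =>
    have : 2 * (m + 1) = (2 * m + 1) + 1 := by ring
    rw [this, List.range_succ, List.range_succ, List.range_succ]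
    simp only [List.map_append, List.flatMap_append, ih]
    simp

theorem aRow_two_mul (x : String) (rest : List String) (i : Nat) (b : Nat) (hb : b < 2) :
    aRow (x :: rest) (2 * i + b) =
      (if b = 1 then x else "*") :: aRow rest i := by
  unfold aRow
  rw [show (x :: rest).length = rest.length + 1 from rfl, List.range_succ_eq_map,
      List.map_cons, List.map_map]
  congr 1
  · have hm : (2 * i + b) % 2 = b := by omega
    have h0 : (2 * i + b).testBit 0 = decide (b = 1) := by
      rw [Nat.testBit_zero, hm]
    rw [h0]
    by_cases hb1 : b = 1 <;> simp [hb1]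
  · apply List.map_congr_left
    intro j hj
    simp only [Function.comp, Nat.succ_eq_add_one]
    rw [Nat.testBit_add_one, show (2 * i + b) / 2 = i by omega]
    rfl

theorem map_aRow_eq_bCore (key : List String) :
    (List.range (2 ^ key.length)).map (aRow key) = bCore key := by
  induction key with
  | nil => simp [aRow, bCore]
  | cons x rest ih =>
    rw [show (x :: rest).length = rest.length + 1 from rfl, pow_succ,
        mul_comm, range_two_mul_map]
    have hstep : ∀ i : Nat,
        [aRow (x :: rest) (2 * i), aRow (x :: rest) (2 * i + 1)] =
          ["*" :: aRow rest i, x :: aRow rest i] := by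
      intro i
      rw [show 2 * i = 2 * i + 0 by omega, aRow_two_mul x rest i 0 (by omega),
          aRow_two_mul x rest i 1 (by omega)]
      simp
    calc (List.range (2 ^ rest.length)).flatMap
            (fun i => [aRow (x :: rest) (2 * i), aRow (x :: rest) (2 * i + 1)])
        = (List.range (2 ^ rest.length)).flatMap
            (fun i => ["*" :: aRow rest i, x :: aRow rest i]) := by
          apply List.flatMap_congr; intro i _; exact hstep i
      _ = ((List.range (2 ^ rest.length)).map (aRow rest)).flatMap
            (fun r => ["*" :: r, x :: r]) := by
          rw [List.flatMap_map]
      _ = bCore (x :: rest) := by rw [ih]; rfl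

-- ===== VERDICT (by name: the statement is the Claim_ definition above) =====
theorem possibleKeys_spec : Claim_equal_possibleKeys := by
  intro key _
  unfold Spec_possibleKeys possibleKeys possibleKeys_alt
  simp only []
  rw [List.foldl_reverse]
  have houter :
      (PySem.List.pyRange 0 ((2:Int) ^ key.length) 1).foldl (fun result i =>
          result ++ [(PySem.List.pyRange 0 (PySem.List.len key) 1).foldl (fun tmp j =>
            if PySem.Int.band i ((1:Int) <<< j) = (1:Int) <<< j then
              tmp ++ [PySem.List.pyGetD key j ""]
            else
              tmp ++ ["*"]) []]) []
        = bCore key := by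
    have hcast : (2:Int) ^ key.length = ((2 ^ key.length : Nat) : Int) := by push_cast; ring
    rw [hcast, PySem.List.pyRange_zero_natCast, PySem.List.foldl_append_singleton_eq_map,
        List.map_map]
    rw [← map_aRow_eq_bCore key]
    apply List.map_congr_left
    intro m _
    exact inner_eq_aRow key m
  rw [houter]
  rfl
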